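-- pv_equiv track=rewrite | github.com/olekhova-geekbrains/seminars-py | Others/task_36.py | get_ascending_sequence
-- ===== SOURCE A (Python) =====
-- def get_ascending_sequence(lst: list, number: int) -> list:
--     seq = [number]
--     start_index = lst.index(number) + 1
--     finish_index = len(lst)
--     current_number = number
--     for idx in range(start_index, finish_index):
--         if current_number < lst[idx]:
--             seq.append(lst[idx])
--             current_number = lst[idx]
--     return seq
-- ===== SOURCE B (Python) =====
-- def get_ascending_sequence(lst: list, number: int) -> list:
--     tail = lst[lst.index(number):]
--     pm = []
--     m = number
--     for x in tail:
--         m = m if m >= x else x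
--         pm.append(m)
--     return [number] + [x for p, x in zip(pm, tail[1:]) if x > p]
-- ===== Notes on version B (the rewrite author's own statement) =====
-- stated objective: alternative
-- what changed: Replaces the online index loop with a scalar accumulator by a two-phase pipeline: slice the tail, build an explicit prefix-maximum table, then select via a zip-based filtering comprehension.
import Mathlib
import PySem

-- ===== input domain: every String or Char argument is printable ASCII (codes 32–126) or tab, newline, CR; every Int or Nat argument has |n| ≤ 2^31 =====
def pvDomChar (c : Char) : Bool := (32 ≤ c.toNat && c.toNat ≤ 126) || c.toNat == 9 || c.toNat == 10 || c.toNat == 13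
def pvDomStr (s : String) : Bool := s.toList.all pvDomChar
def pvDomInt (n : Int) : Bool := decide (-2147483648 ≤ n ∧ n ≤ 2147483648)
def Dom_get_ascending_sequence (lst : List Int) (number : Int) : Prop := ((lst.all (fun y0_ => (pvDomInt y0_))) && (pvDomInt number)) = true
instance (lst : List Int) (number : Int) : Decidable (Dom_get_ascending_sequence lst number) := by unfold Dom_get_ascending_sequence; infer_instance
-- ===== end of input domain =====

-- B replaces A's online index loop by a slice + explicit prefix-maximum table + zip-filter pipeline (alternative decomposition, same cost).


-- ===== PORT A =====
def get_ascending_sequence (lst : List Int) (number : Int) : List Int :=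
  match PySem.List.index? lst number with
  | none => []  -- lst.index raises ValueError; excluded by Pre_
  | some i =>
    let start_index : Int := (i : Int) + 1
    let finish_index : Int := (lst.length : Int)
    let res := (PySem.List.pyRange start_index finish_index 1).foldl
      (fun (st : List Int × Int) idx =>
        if st.2 < PySem.List.pyGetD lst idx 0 then
          (st.1 ++ [PySem.List.pyGetD lst idx 0], PySem.List.pyGetD lst idx 0)
        else st)
      ([number], number)
    res.1

-- ===== PORT B =====
def get_ascending_sequence_alt (lst : List Int) (number : Int) : List Int :=
  match PySem.List.index? lst number with
  | none => []  -- lst.index raises ValueError; excluded by Pre_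
  | some i =>
    let tail := PySem.List.slice lst (some (i : Int)) none
    let pm := (tail.foldl
      (fun (st : List Int × Int) x =>
        let m := if st.2 ≥ x then st.2 else x
        (st.1 ++ [m], m)) ([], number)).1
    [number] ++ (pm.zip (PySem.List.slice tail (some 1) none)).filterMap
      (fun px => if px.2 > px.1 then some px.2 else none)

-- ===== PRECONDITION & SPEC =====
-- Pre_ excludes exactly the inputs where A raises ValueError (number absent from lst); B raises there too.
def Pre_get_ascending_sequence (lst : List Int) (number : Int) : Prop := number ∈ lst
instance (lst : List Int) (number : Int) : Decidable (Pre_get_ascending_sequence lst number) := by unfold Pre_get_ascending_sequence; infer_instance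
def pvWitness_get_ascending_sequence : List Int × Int := ([3, 1, 4, 1, 5], 3)

def Spec_get_ascending_sequence (lst : List Int) (number : Int) (out : List Int) : Prop := out = get_ascending_sequence_alt lst number
instance (lst : List Int) (number : Int) (out : List Int) : Decidable (Spec_get_ascending_sequence lst number out) := by unfold Spec_get_ascending_sequence; infer_instance

-- ===== CLAIM (what is proved, stated in full; the proofs are below) =====
def Claim_equal_get_ascending_sequence : Prop := ∀ (lst : List Int) (number : Int), Dom_get_ascending_sequence lst number → Pre_get_ascending_sequence lst number → Spec_get_ascending_sequence lst number (get_ascending_sequence lst number)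

-- ===== LEMMAS AND PROOFS =====

-- A's selection loop, state-free form
def selA (xs : List Int) (c : Int) : List Int :=
  match xs with
  | [] => []
  | x :: rest => if c < x then x :: selA rest x else selA rest c

-- B's prefix-maximum table, state-free form
def pms (xs : List Int) (m : Int) : List Int :=
  match xs with
  | [] => []
  | x :: rest => (if m ≥ x then m else x) :: pms rest (if m ≥ x then m else x)

theorem foldlA_eq_selA (xs : List Int) (seq : List Int) (c : Int) :
    (xs.foldl (fun (st : List Int × Int) v =>
        if st.2 < v then (st.1 ++ [v], v) else st) (seq, c)).1 = seq ++ selA xs c := by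
  induction xs generalizing seq c with
  | nil => simp [selA]
  | cons x rest ih =>
    simp only [List.foldl_cons, selA]
    by_cases h : c < x
    · simp [h, ih]
    · simp [h, ih]

theorem foldlB_eq_pms (xs : List Int) (acc : List Int) (m : Int) :
    (xs.foldl (fun (st : List Int × Int) x =>
        ((st.1 ++ [if st.2 ≥ x then st.2 else x]), if st.2 ≥ x then st.2 else x)) (acc, m)).1
      = acc ++ pms xs m := by
  induction xs generalizing acc m with
  | nil => simp [pms]
  | cons x rest ih => simp [List.foldl_cons, pms, ih]

theorem zip_pms_filter (xs : List Int) (m : Int) :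
    ((m :: pms xs m).zip xs).filterMap
        (fun px : Int × Int => if px.2 > px.1 then some px.2 else none)
      = selA xs m := by
  induction xs generalizing m with
  | nil => simp [selA]
  | cons x rest ih =>
    simp only [pms, List.zip_cons_cons, List.filterMap_cons, selA]
    by_cases h : m < x
    · have hge : ¬ (m ≥ x) := by omega
      simp [h, hge, ih]
    · have hge : m ≥ x := by omega
      have hx : ¬ (x > m) := by omega
      simp [hx, hge, ih]

-- ===== VERDICT (by name: the statement is the Claim_ definition above) =====
theorem get_ascending_sequence_spec : Claim_equal_get_ascending_sequence := by
  intro lst number _hdom hmem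
  unfold Spec_get_ascending_sequence get_ascending_sequence get_ascending_sequence_alt
  have hsome : (PySem.List.index? lst number).isSome := (PySem.List.index?_isSome_iff lst number).2 hmem
  obtain ⟨i, hi⟩ := Option.isSome_iff_exists.1 hsome
  obtain ⟨pre, suf, heq, hlen, -⟩ := (PySem.List.index?_eq_some_iff lst number i).1 hi
  rw [hi]
  -- A side
  have hdrop : lst.drop i = number :: suf := by
    rw [heq, ← hlen, List.drop_left]
  have hdrop1 : lst.drop (i + 1) = suf := by
    have h := congrArg List.tail hdrop
    rwa [List.tail_drop] at h
  have hA : (PySem.List.pyRange ((i : Int) + 1) (lst.length : Int) 1).foldl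
      (fun (st : List Int × Int) idx =>
        if st.2 < PySem.List.pyGetD lst idx 0 then
          (st.1 ++ [PySem.List.pyGetD lst idx 0], PySem.List.pyGetD lst idx 0)
        else st)
      ([number], number)
      = suf.foldl (fun (st : List Int × Int) v =>
          if st.2 < v then (st.1 ++ [v], v) else st) ([number], number) := by
    have h := PySem.List.foldl_pyRange_pyGetD' lst 0
      (fun (st : List Int × Int) v => if st.2 < v then (st.1 ++ [v], v) else st)
      ([number], number) (a := (i : Int) + 1) (by positivity)
    have ht : ((i : Int) + 1).toNat = i + 1 := by omega
    rw [ht, hdrop1] at h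
    exact h
  -- B side
  have htail : PySem.List.slice lst (some (i : Int)) none = number :: suf := by
    rw [PySem.List.slice_from_natCast, hdrop]
  simp only [htail, PySem.List.slice_from_one, List.tail_cons, hA, foldlA_eq_selA]
  have hpm : ((number :: suf).foldl
      (fun (st : List Int × Int) x =>
        let m := if st.2 ≥ x then st.2 else x
        (st.1 ++ [m], m)) ([], number)).1 = number :: pms suf number := by
    have h := foldlB_eq_pms (number :: suf) [] number
    simpa [pms] using h
  simp only [hpm, zip_pms_filter]
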